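-- pv_equiv track=rewrite | github.com/jeffreyyun/CompetitiveProgrammingProblems | CodeSprintLA/2021_IndividualOpen/D.py | findSubsetDivisibleByN
-- ===== SOURCE A (Python) =====
-- def findSubsetDivisibleByN(N, candies):
--     NC = len(candies)
--     def help(ind=0, total=0, path=[]):
--         for i in range(ind+1, NC):
--             if (total+candies[i]) % N == 0: # base case
--                 return path+[i+1]
--             tmp = help(i, total+candies[i], path+[i+1])
--             if tmp: return tmp  # if it works, great!!
--
--     tmp = help(-1, 0, [])
--     return tmp
-- ===== SOURCE B (Python) =====
-- def findSubsetDivisibleByN(N, candies):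
--     NC = len(candies)
--     memo = {}
--
--     def search(ind, r):
--         # first solution reachable from state (ind, r): depends only on the residue r
--         key = (ind, r)
--         if key in memo:
--             return memo[key]
--         res = None
--         for i in range(ind + 1, NC):
--             r2 = (r + candies[i]) % N
--             if r2 == 0:
--                 res = [i + 1]
--                 break
--             rest = search(i, r2)
--             if rest is not None:
--                 res = [i + 1] + rest
--                 break
--         memo[key] = res
--         return res
--
--     return search(-1, 0)
-- ===== Notes on version B (the rewrite author's own statement) =====
-- stated objective: alternative
-- what changed: Replaces A's exponential DFS over all increasing index sequences by top-down memoization over (index, residue mod N) states, which yields the same first (DFS-order) solution because the continuation from a state depends only on the running sum's residue; intended as faster (exponential worst case becomes polynomial in states), but a timing run could not confirm a consistent speed-up on its generated inputs, so no speed is claimed.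
import Mathlib
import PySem

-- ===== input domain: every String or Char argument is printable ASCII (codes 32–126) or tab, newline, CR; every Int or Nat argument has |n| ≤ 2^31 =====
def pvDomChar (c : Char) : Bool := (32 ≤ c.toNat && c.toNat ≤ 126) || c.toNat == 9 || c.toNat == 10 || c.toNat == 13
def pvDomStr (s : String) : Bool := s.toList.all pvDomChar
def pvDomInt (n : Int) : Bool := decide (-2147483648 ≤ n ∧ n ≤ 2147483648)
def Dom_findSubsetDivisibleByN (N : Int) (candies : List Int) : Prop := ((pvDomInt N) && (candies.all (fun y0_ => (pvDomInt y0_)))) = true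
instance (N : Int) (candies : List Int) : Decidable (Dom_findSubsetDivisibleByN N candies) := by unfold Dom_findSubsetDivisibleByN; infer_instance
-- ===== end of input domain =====

-- B replaces A's DFS over increasing index sequences by top-down memoization over
-- (index, residue mod N) states, returning the same first (DFS-order) solution; objective: alternative.

-- ===== PORT A =====
-- A's recursion depth is bounded by len(candies)+1 (ind strictly increases and the loop is
-- empty once ind+1 ≥ len(candies)), so the fuel cs.length+2 is never exhausted.
mutual
def pvHelpA (N : Int) (cs : List Int) : Nat → Int → Int → List Int → Option (List Int)
  | 0, _, _, _ => none  -- fuel guard, unreachable from the top-level call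
  | fuel+1, ind, total, path =>
      pvLoopA N cs fuel (PySem.List.pyRange (ind+1) (cs.length : Int) 1) total path
  termination_by fuel _ _ _ => (fuel, 0)
def pvLoopA (N : Int) (cs : List Int) : Nat → List Int → Int → List Int → Option (List Int)
  | _, [], _, _ => none  -- loop ends: Python's implicit 'return None'
  | fuel, i :: rest, total, path =>
      let c := PySem.List.pyGetD cs i 0  -- candies[i]; 0 ≤ i < len(candies) always, so exact
      if PySem.Int.mod (total + c) N = 0 then some (path ++ [i+1])
      else match pvHelpA N cs fuel i (total + c) (path ++ [i+1]) with
        | some (x :: xs) => some (x :: xs)  -- 'if tmp:' — truthy iff a non-empty list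
        | _ => pvLoopA N cs fuel rest total path
  termination_by fuel is _ _ => (fuel, is.length + 1)
end

def findSubsetDivisibleByN (N : Int) (candies : List Int) : Option (List Int) :=
  pvHelpA N candies (candies.length + 2) (-1) 0 []

-- ===== PORT B =====
mutual
def pvGoB (N : Int) (cs : List Int) :
    Nat → Int → Int → PySem.Dict (Int × Int) (Option (List Int)) →
    PySem.Dict (Int × Int) (Option (List Int)) × Option (List Int)
  | 0, _, _, memo => (memo, none)  -- fuel guard, unreachable from the top-level call
  | fuel+1, ind, r, memo =>
      match memo.get? (ind, r) with
      | some v => (memo, v)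
      | none =>
          let p := pvLoopB N cs fuel (PySem.List.pyRange (ind+1) (cs.length : Int) 1) r memo
          (p.1.insert (ind, r) p.2, p.2)
  termination_by fuel _ _ _ => (fuel, 0)
def pvLoopB (N : Int) (cs : List Int) :
    Nat → List Int → Int → PySem.Dict (Int × Int) (Option (List Int)) →
    PySem.Dict (Int × Int) (Option (List Int)) × Option (List Int)
  | _, [], _, memo => (memo, none)
  | fuel, i :: rest, r, memo =>
      let r2 := PySem.Int.mod (r + PySem.List.pyGetD cs i 0) N
      if r2 = 0 then (memo, some [i+1])
      else match pvGoB N cs fuel i r2 memo with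
        | (memo', some t) => (memo', some ((i+1) :: t))
        | (memo', none) => pvLoopB N cs fuel rest r memo'
  termination_by fuel is _ _ => (fuel, is.length + 1)
end

def findSubsetDivisibleByN_alt (N : Int) (candies : List Int) : Option (List Int) :=
  (pvGoB N candies (candies.length + 2) (-1) 0 PySem.Dict.empty).2

-- ===== PRECONDITION & SPEC =====
-- Pre_ excludes exactly the inputs where A raises ZeroDivisionError (N = 0 with a non-empty
-- list reaches '% N'); B raises there too.
def Pre_findSubsetDivisibleByN (N : Int) (candies : List Int) : Prop := N ≠ 0 ∨ candies = []
instance (N : Int) (candies : List Int) : Decidable (Pre_findSubsetDivisibleByN N candies) := by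
  unfold Pre_findSubsetDivisibleByN; infer_instance
def pvWitness_findSubsetDivisibleByN : Int × List Int := (3, [1, 2, 4])

def Spec_findSubsetDivisibleByN (N : Int) (candies : List Int) (out : Option (List Int)) : Prop := out = findSubsetDivisibleByN_alt N candies
instance (N : Int) (candies : List Int) (out : Option (List Int)) : Decidable (Spec_findSubsetDivisibleByN N candies out) := by unfold Spec_findSubsetDivisibleByN; infer_instance

-- ===== CLAIM (what is proved, stated in full; the proofs are below) =====
def Claim_equal_findSubsetDivisibleByN : Prop := ∀ (N : Int) (candies : List Int), Dom_findSubsetDivisibleByN N candies → Pre_findSubsetDivisibleByN N candies → Spec_findSubsetDivisibleByN N candies (findSubsetDivisibleByN N candies)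

-- ===== LEMMAS AND PROOFS =====

-- The common pure recursion: the first (DFS-order) solution from state (ind, r),
-- where r is the running sum's residue mod N.
def pvPure (N : Int) (cs : List Int) (ind : Int) (r : Int) : Option (List Int) :=
  (PySem.List.pyRange (ind+1) (cs.length : Int) 1).attach.findSome? (fun x =>
    let r2 := PySem.Int.mod (r + PySem.List.pyGetD cs x.1 0) N
    if r2 = 0 then some [x.1+1] else (pvPure N cs x.1 r2).map (fun t => (x.1+1) :: t))
termination_by ((cs.length : Int) - ind).toNat
decreasing_by
  have h := PySem.List.mem_pyRange_one.mp x.2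
  omega

theorem pv_findSome?_attach {α β : Type} (l : List α) (g : α → Option β) :
    (l.attach.findSome? fun x => g x.1) = l.findSome? g := by
  conv_rhs => rw [← List.attach_map_subtype_val l]
  rw [List.findSome?_map]
  rfl

theorem pvPure_eq (N : Int) (cs : List Int) (ind r : Int) :
    pvPure N cs ind r =
      (PySem.List.pyRange (ind+1) (cs.length : Int) 1).findSome? (fun i =>
        if PySem.Int.mod (r + PySem.List.pyGetD cs i 0) N = 0 then some [i+1]
        else (pvPure N cs i (PySem.Int.mod (r + PySem.List.pyGetD cs i 0) N)).map
          (fun t => (i+1) :: t)) := by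
  rw [pvPure]
  exact pv_findSome?_attach (PySem.List.pyRange (ind+1) (cs.length : Int) 1)
    (fun i => if PySem.Int.mod (r + PySem.List.pyGetD cs i 0) N = 0 then some [i+1]
      else (pvPure N cs i (PySem.Int.mod (r + PySem.List.pyGetD cs i 0) N)).map
        (fun t => (i+1) :: t))

theorem pv_mod_zero (a : Int) : PySem.Int.mod a 0 = a := by
  have h := PySem.Int.floordiv_mul_add_mod a 0
  simpa using h

theorem pv_mod_sub_dvd (a N : Int) : N ∣ (PySem.Int.mod a N - a) := by
  refine ⟨-(PySem.Int.floordiv a N), ?_⟩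
  linear_combination PySem.Int.floordiv_mul_add_mod a N

theorem pv_mod_mod (N a c : Int) :
    PySem.Int.mod (PySem.Int.mod a N + c) N = PySem.Int.mod (a + c) N := by
  by_cases hN : N = 0
  · subst hN; simp [pv_mod_zero]
  · have d1 := pv_mod_sub_dvd a N
    have d2 := pv_mod_sub_dvd (PySem.Int.mod a N + c) N
    have d3 := pv_mod_sub_dvd (a + c) N
    have dd : N ∣ (PySem.Int.mod (PySem.Int.mod a N + c) N - PySem.Int.mod (a + c) N) := by
      have h12 := dvd_add (dvd_sub d2 d3) d1
      have e : (PySem.Int.mod (PySem.Int.mod a N + c) N - (PySem.Int.mod a N + c)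
          - (PySem.Int.mod (a + c) N - (a + c))) + (PySem.Int.mod a N - a)
          = PySem.Int.mod (PySem.Int.mod a N + c) N - PySem.Int.mod (a + c) N := by ring
      rwa [e] at h12
    have dd' : |N| ∣ (PySem.Int.mod (PySem.Int.mod a N + c) N - PySem.Int.mod (a + c) N) :=
      (abs_dvd _ _).mpr dd
    rcases lt_or_gt_of_ne hN with hneg | hpos
    · have b1 := PySem.Int.mod_neg_bounds (PySem.Int.mod a N + c) hneg
      have b2 := PySem.Int.mod_neg_bounds (a + c) hneg
      have habs : |PySem.Int.mod (PySem.Int.mod a N + c) N - PySem.Int.mod (a + c) N| < |N| := by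
        rw [abs_of_neg hneg, abs_lt]; omega
      have := Int.eq_zero_of_abs_lt_dvd dd' habs
      omega
    · have b1a := PySem.Int.mod_nonneg (PySem.Int.mod a N + c) hpos
      have b1b := PySem.Int.mod_lt (PySem.Int.mod a N + c) hpos
      have b2a := PySem.Int.mod_nonneg (a + c) hpos
      have b2b := PySem.Int.mod_lt (a + c) hpos
      have habs : |PySem.Int.mod (PySem.Int.mod a N + c) N - PySem.Int.mod (a + c) N| < |N| := by
        rw [abs_of_pos hpos, abs_lt]; omega
      have := Int.eq_zero_of_abs_lt_dvd dd' habs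
      omega

-- A's DFS with the path accumulator equals the pure recursion on the residue.
theorem pv_bridgeA (N : Int) (cs : List Int) :
    ∀ (fuel : Nat) (ind total : Int) (path : List Int),
      ((cs.length : Int) - ind).toNat ≤ fuel →
      pvHelpA N cs fuel ind total path
        = (pvPure N cs ind (PySem.Int.mod total N)).map (fun t => path ++ t) := by
  intro fuel
  induction fuel with
  | zero =>
    intro ind total path h
    rw [pvPure_eq, PySem.List.pyRange_one_eq_nil (by omega)]
    simp [pvHelpA]
  | succ f IH =>
    intro ind total path h
    simp only [pvHelpA]
    rw [pvPure_eq]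
    simp only [pv_mod_mod]
    have hloop : ∀ (k : Nat) (m : Int), ((cs.length : Int) - m).toNat ≤ f →
        ((cs.length : Int) - m).toNat = k →
        pvLoopA N cs f (PySem.List.pyRange m (cs.length : Int) 1) total path
          = ((PySem.List.pyRange m (cs.length : Int) 1).findSome? (fun i =>
              if PySem.Int.mod (total + PySem.List.pyGetD cs i 0) N = 0 then some [i+1]
              else (pvPure N cs i (PySem.Int.mod (total + PySem.List.pyGetD cs i 0) N)).map
                (fun t => (i+1) :: t))).map (fun t => path ++ t) := by
      intro k
      induction k with
      | zero =>
        intro m hm hk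
        rw [PySem.List.pyRange_one_eq_nil (by omega)]
        simp [pvLoopA]
      | succ k ihk =>
        intro m hm hk
        rw [PySem.List.pyRange_one_cons (by omega)]
        simp only [pvLoopA, List.findSome?_cons]
        by_cases hc : PySem.Int.mod (total + PySem.List.pyGetD cs m 0) N = 0
        · simp [hc]
        · simp only [if_neg hc]
          rw [IH m (total + PySem.List.pyGetD cs m 0) (path ++ [m+1]) (by omega)]
          cases hp : pvPure N cs m (PySem.Int.mod (total + PySem.List.pyGetD cs m 0) N) with
          | none =>
            simp only [Option.map_none]
            exact ihk (m+1) (by omega) (by omega)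
          | some t =>
            simp only [Option.map_some]
            rcases path with _ | ⟨p, ps⟩
            · simp
            · simp [List.append_assoc]
    exact hloop _ (ind+1) (by omega) rfl

-- Every value stored in B's memo is the pure value of its state.
def pvInv (N : Int) (cs : List Int) (memo : PySem.Dict (Int × Int) (Option (List Int))) : Prop :=
  ∀ (p : Int × Int) (v : Option (List Int)), memo.get? p = some v → v = pvPure N cs p.1 p.2

theorem pv_bridgeB (N : Int) (cs : List Int) :
    ∀ (fuel : Nat) (ind r : Int) (memo : PySem.Dict (Int × Int) (Option (List Int))),
      pvInv N cs memo → ((cs.length : Int) - ind).toNat < fuel →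
      (pvGoB N cs fuel ind r memo).2 = pvPure N cs ind r
        ∧ pvInv N cs (pvGoB N cs fuel ind r memo).1 := by
  intro fuel
  induction fuel with
  | zero => intro ind r memo hinv h; omega
  | succ f IH =>
    intro ind r memo hinv h
    have hloop : ∀ (is : List Int) (r' : Int)
        (memo' : PySem.Dict (Int × Int) (Option (List Int))),
        pvInv N cs memo' → (∀ i ∈ is, ((cs.length : Int) - i).toNat < f) →
        (pvLoopB N cs f is r' memo').2 = is.findSome? (fun i =>
            if PySem.Int.mod (r' + PySem.List.pyGetD cs i 0) N = 0 then some [i+1]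
            else (pvPure N cs i (PySem.Int.mod (r' + PySem.List.pyGetD cs i 0) N)).map
              (fun t => (i+1) :: t))
          ∧ pvInv N cs (pvLoopB N cs f is r' memo').1 := by
      intro is
      induction is with
      | nil => intro r' memo' hinv' _; exact ⟨by simp [pvLoopB], by simpa [pvLoopB] using hinv'⟩
      | cons i rest ihl =>
        intro r' memo' hinv' hbd
        simp only [pvLoopB, List.findSome?_cons]
        by_cases hc : PySem.Int.mod (r' + PySem.List.pyGetD cs i 0) N = 0
        · exact ⟨by simp [hc], by simpa [hc] using hinv'⟩
        · simp only [if_neg hc]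
          have hg := IH i (PySem.Int.mod (r' + PySem.List.pyGetD cs i 0) N) memo' hinv'
            (hbd i (by simp))
          rcases hgo : pvGoB N cs f i (PySem.Int.mod (r' + PySem.List.pyGetD cs i 0) N) memo'
            with ⟨memo₁, res⟩
          rw [hgo] at hg
          rcases hg with ⟨hg1, hg2⟩
          simp only at hg1 hg2
          cases res with
          | some t => simp [← hg1, hg2]
          | none =>
            simp only [← hg1]
            exact ihl r' memo₁ hg2 (fun j hj => hbd j (by simp [hj]))
    rcases hget : memo.get? (ind, r) with _ | v
    · -- not memoized: run the loop, then record the result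
      have hbd : ∀ i ∈ PySem.List.pyRange (ind+1) (cs.length : Int) 1,
          ((cs.length : Int) - i).toNat < f := by
        intro i hi
        have := PySem.List.mem_pyRange_one.mp hi
        omega
      have hl := hloop (PySem.List.pyRange (ind+1) (cs.length : Int) 1) r memo hinv hbd
      rcases hlp : pvLoopB N cs f (PySem.List.pyRange (ind+1) (cs.length : Int) 1) r memo
        with ⟨memo₁, res⟩
      rw [hlp] at hl
      obtain ⟨hl1, hl2⟩ := hl
      simp only at hl1 hl2
      have hres : res = pvPure N cs ind r := by rw [hl1, ← pvPure_eq]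
      simp only [pvGoB, hget, hlp]
      refine ⟨by simpa using hres, ?_⟩
      intro q v hq
      rw [PySem.Dict.get?_insert] at hq
      by_cases hq' : q = (ind, r)
      · subst hq'
        rw [if_pos rfl] at hq
        injection hq with hv
        simpa [← hv] using hres
      · rw [if_neg hq'] at hq
        exact hl2 q v hq
    · -- memoized: the invariant gives the value
      simp only [pvGoB, hget]
      exact ⟨hinv (ind, r) v hget, hinv⟩

-- ===== VERDICT (by name: the statement is the Claim_ definition above) =====
theorem findSubsetDivisibleByN_spec : Claim_equal_findSubsetDivisibleByN := by
  intro N cs _ _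
  unfold Spec_findSubsetDivisibleByN findSubsetDivisibleByN findSubsetDivisibleByN_alt
  have hA := pv_bridgeA N cs (cs.length + 2) (-1) 0 [] (by omega)
  have hB := pv_bridgeB N cs (cs.length + 2) (-1) 0 PySem.Dict.empty
    (by intro p v hp; rw [PySem.Dict.get?_empty] at hp; cases hp) (by omega)
  have hz : PySem.Int.mod 0 N = 0 := (PySem.Int.mod_eq_zero_iff_dvd 0 N).mpr (dvd_zero N)
  rw [hA, hB.1, hz]
  simp
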